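-- pv_equiv track=rewrite | github.com/m4drian/WebGraphicsTesting | ExtractGPUdata.py | calculate_durations_per_second
-- ===== SOURCE A (Python) =====
-- def calculate_durations_per_second(data):
--   result = []
--   current_second = data[0][0] // 1000000  # Convert first timestamp to seconds
--   total_duration = 0
--
--   for timestamp, duration in data:
--     second = timestamp // 1000000
--     if second != current_second:
--       result.append((current_second, total_duration))
--       current_second = second
--       total_duration = 0
--     total_duration += duration
--
--   # Add the last second's data
--   result.append((current_second, total_duration))
--
--   return result
-- ===== SOURCE B (Python) =====
-- def calculate_durations_per_second(data):
--     # Build the result back-to-front: walk the data right-to-left and merge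
--     # each entry into the head group of the result (extend the head group when
--     # it has the same second, otherwise prepend a new group). No running
--     # accumulator state and no trailing flush. Returns [] on empty input
--     # (A raises IndexError there).
--     result = []
--     for timestamp, duration in reversed(data):
--         second = timestamp // 1000000
--         if result and result[0][0] == second:
--             result[0] = (second, result[0][1] + duration)
--         else:
--             result.insert(0, (second, duration))
--     return result
-- ===== Notes on version B (the rewrite author's own statement) =====
-- stated objective: alternative
-- what changed: A scans left-to-right carrying current_second/total_duration state, flushing a tuple at each key change plus a trailing flush; B instead builds the output back-to-front, traversing the data right-to-left and merging each entry directly into the head group of the result list, so there is no carried accumulator state and no final flush.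
import Mathlib
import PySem

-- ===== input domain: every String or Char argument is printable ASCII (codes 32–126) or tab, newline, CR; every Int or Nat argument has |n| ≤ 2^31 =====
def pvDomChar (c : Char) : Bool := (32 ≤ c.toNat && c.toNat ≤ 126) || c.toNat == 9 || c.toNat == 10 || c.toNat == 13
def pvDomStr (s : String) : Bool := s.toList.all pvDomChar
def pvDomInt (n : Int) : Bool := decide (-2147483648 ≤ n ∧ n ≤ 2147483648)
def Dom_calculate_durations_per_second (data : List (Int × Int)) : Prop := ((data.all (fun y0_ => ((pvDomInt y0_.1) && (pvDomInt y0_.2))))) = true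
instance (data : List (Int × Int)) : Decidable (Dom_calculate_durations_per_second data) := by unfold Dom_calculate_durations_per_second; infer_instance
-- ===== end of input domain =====

-- B builds the output back-to-front (right-to-left traversal merging each entry into the head
-- group of the result) instead of A's left-to-right stateful pass with flush-on-change; same O(n).

-- ===== PORT A =====
-- one step of A's `for timestamp, duration in data` loop over state (result, current_second, total_duration)
def pvAStep (st : List (Int × Int) × Int × Int) (p : Int × Int) : List (Int × Int) × Int × Int :=
  let second := PySem.Int.floordiv p.1 1000000
  if second ≠ st.2.1 then
    (st.1 ++ [(st.2.1, st.2.2)], second, p.2)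
  else
    (st.1, st.2.1, st.2.2 + p.2)

def calculate_durations_per_second (data : List (Int × Int)) : List (Int × Int) :=
  -- data[0][0] // 1000000 ; on empty data Python raises IndexError (excluded by Pre_)
  let current_second := PySem.Int.floordiv data.headI.1 1000000
  let st := data.foldl pvAStep ([], current_second, 0)
  st.1 ++ [(st.2.1, st.2.2)]

-- ===== PORT B =====
-- body of B's loop: merge one entry into the front of the result list
def pvMerge (p : Int × Int) (result : List (Int × Int)) : List (Int × Int) :=
  let second := PySem.Int.floordiv p.1 1000000
  match result with
  | (s, tot) :: rest =>
    if s = second then (second, tot + p.2) :: rest      -- result[0] = (second, result[0][1] + duration)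
    else (second, p.2) :: (s, tot) :: rest              -- result.insert(0, (second, duration))
  | [] => [(second, p.2)]                               -- result empty: insert at front

-- `for p in reversed(data): result = merge p into result` is a right fold over data
def calculate_durations_per_second_alt (data : List (Int × Int)) : List (Int × Int) :=
  data.foldr pvMerge []

-- ===== PRECONDITION & SPEC =====
-- Pre_ excludes only the empty list, on which A raises IndexError (data[0]).
def Pre_calculate_durations_per_second (data : List (Int × Int)) : Prop := data ≠ []
instance (data : List (Int × Int)) : Decidable (Pre_calculate_durations_per_second data) := by unfold Pre_calculate_durations_per_second; infer_instance
def pvWitness_calculate_durations_per_second : (List (Int × Int)) := [(1000000, 2), (2500000, 3)]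

def Spec_calculate_durations_per_second (data : List (Int × Int)) (out : List (Int × Int)) : Prop := out = calculate_durations_per_second_alt data
instance (data : List (Int × Int)) (out : List (Int × Int)) : Decidable (Spec_calculate_durations_per_second data out) := by unfold Spec_calculate_durations_per_second; infer_instance

-- ===== CLAIM =====
def Claim_equal_calculate_durations_per_second : Prop := ∀ (data : List (Int × Int)), Dom_calculate_durations_per_second data → Pre_calculate_durations_per_second data → Spec_calculate_durations_per_second data (calculate_durations_per_second data)

-- ===== LEMMAS AND PROOFS =====

-- pvMerge with the key already extracted
def pvM (sec td : Int) (res : List (Int × Int)) : List (Int × Int) :=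
  match res with
  | (s, tot) :: rest => if s = sec then (sec, tot + td) :: rest else (sec, td) :: (s, tot) :: rest
  | [] => [(sec, td)]

theorem pvMerge_eq_pvM (p : Int × Int) (res : List (Int × Int)) :
    pvMerge p res = pvM (PySem.Int.floordiv p.1 1000000) p.2 res := by
  cases res with
  | nil => rfl
  | cons q rest => obtain ⟨s, tot⟩ := q; rfl

-- functional description of A's loop tail: groups emitted from state (cur, td)
def pvG (cur td : Int) : List (Int × Int) → List (Int × Int)
  | [] => [(cur, td)]
  | (t, d) :: rs =>
    if PySem.Int.floordiv t 1000000 ≠ cur then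
      (cur, td) :: pvG (PySem.Int.floordiv t 1000000) d rs
    else
      pvG cur (td + d) rs

theorem pvFoldA (xs : List (Int × Int)) : ∀ (res : List (Int × Int)) (cur td : Int),
    (let st := xs.foldl pvAStep (res, cur, td); st.1 ++ [(st.2.1, st.2.2)]) = res ++ pvG cur td xs := by
  induction xs with
  | nil => intro res cur td; simp [pvG]
  | cons p rs ih =>
    intro res cur td
    obtain ⟨t, d⟩ := p
    simp only [List.foldl_cons, pvAStep, pvG]
    split_ifs with h
    · rw [ih]; simp
    · rw [ih]

theorem pvM_pvM (cur td d : Int) (L : List (Int × Int)) :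
    pvM cur td (pvM cur d L) = pvM cur (td + d) L := by
  cases L with
  | nil => simp [pvM]; ring
  | cons q rest =>
    obtain ⟨s, tot⟩ := q
    by_cases h : s = cur
    · simp [pvM, h]; ring
    · simp [pvM, h]; ring

theorem pvM_of_ne (cur td k d : Int) (L : List (Int × Int)) (h : k ≠ cur) :
    pvM cur td (pvM k d L) = (cur, td) :: pvM k d L := by
  cases L with
  | nil => simp [pvM, h]
  | cons q rest =>
    obtain ⟨s, tot⟩ := q
    by_cases hs : s = k <;> simp [pvM, hs, h]

theorem pvG_eq (xs : List (Int × Int)) : ∀ (cur td : Int),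
    pvG cur td xs = pvM cur td (xs.foldr pvMerge []) := by
  induction xs with
  | nil => intro cur td; rfl
  | cons p rs ih =>
    intro cur td
    obtain ⟨t, d⟩ := p
    simp only [List.foldr_cons, pvG, pvMerge_eq_pvM]
    by_cases h : PySem.Int.floordiv t 1000000 = cur
    · rw [if_neg (fun hc => hc h), ih, h, pvM_pvM]
    · rw [if_pos h, ih, pvM_of_ne _ _ _ _ _ h]

-- ===== VERDICT =====
theorem calculate_durations_per_second_spec : Claim_equal_calculate_durations_per_second := by
  intro data _ hpre
  unfold Spec_calculate_durations_per_second
  match data with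
  | [] => exact absurd rfl hpre
  | (t, d) :: rs =>
    show (let st := ((t, d) :: rs).foldl pvAStep ([], PySem.Int.floordiv ((t, d) :: rs).headI.1 1000000, 0);
          st.1 ++ [(st.2.1, st.2.2)]) = _
    rw [pvFoldA]
    simp only [List.headI, pvG, if_neg (fun hc : PySem.Int.floordiv t 1000000 ≠ PySem.Int.floordiv t 1000000 => hc rfl)]
    rw [pvG_eq]
    show _ = List.foldr pvMerge [] ((t, d) :: rs)
    simp only [List.foldr_cons, pvMerge_eq_pvM, zero_add, List.nil_append]
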